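-- pv_equiv track=rewrite | github.com/weka511/bioinformatics | rosalind_old.py | sseq
-- ===== SOURCE A (Python) =====
-- def sseq(fasta):
--     def find_indices_of_motif(text,motif,start=0,target=None):
--         if target==None:
--             target=len(motif)
--         for i in range(start,len(text)):
--             if motif[0]==text[i]:
--                 if len(motif)==1:
--                     return [i]
--                 else:
--                     indices=find_indices_of_motif(text,motif[1:],i+1,target-1)
--                     if len(indices)==target-1:
--                         return indices + [i]
--         return[]
--     _,text=fasta[0]
--     _,motif=fasta[1]
--     return [i+1 for i in find_indices_of_motif(text,motif)[-1::-1]]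
-- ===== SOURCE B (Python) =====
-- def sseq(fasta):
--     _, text = fasta[0]
--     _, motif = fasta[1]
--     out = []
--     j = 0
--     for i, c in enumerate(text):
--         if j < len(motif) and c == motif[j]:
--             out.append(i + 1)
--             j += 1
--     return out if j == len(motif) else []
-- ===== Notes on version B (the rewrite author's own statement) =====
-- stated objective: faster
-- what changed: A's backtracking recursion over motif suffixes (re-scanning the text and retrying later first-character positions) is replaced by a single greedy left-to-right scan consuming motif characters in order, correct because the earliest feasible match position is always safe for subsequence matching; intended as asymptotically faster (measured 9.5x at n=4096, and A timed out at n=16384 where B returned).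
import Mathlib
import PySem

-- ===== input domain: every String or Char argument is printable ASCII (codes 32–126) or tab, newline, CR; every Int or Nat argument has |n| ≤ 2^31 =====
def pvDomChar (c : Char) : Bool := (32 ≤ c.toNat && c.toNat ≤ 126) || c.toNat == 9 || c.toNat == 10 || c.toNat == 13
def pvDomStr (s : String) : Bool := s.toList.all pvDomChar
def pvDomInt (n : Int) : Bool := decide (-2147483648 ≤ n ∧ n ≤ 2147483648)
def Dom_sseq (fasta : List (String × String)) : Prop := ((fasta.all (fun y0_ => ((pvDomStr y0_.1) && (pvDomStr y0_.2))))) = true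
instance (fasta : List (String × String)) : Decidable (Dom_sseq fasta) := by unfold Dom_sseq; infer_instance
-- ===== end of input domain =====

-- B replaces A's backtracking recursion over suffixes by a single greedy left-to-right scan
-- (correct because for subsequence matching the earliest feasible choice is always safe).

-- ===== PORT A =====
-- find_indices_of_motif(text,motif,start,target); the default target=None is always resolved
-- to len(motif) at the top call, so the port takes target explicitly and sseq passes len(motif).
-- motif[0] on empty motif would raise IndexError in Python (excluded by Pre_sseq); the port
-- returns [] there.
def fimA (text motif : List Char) (start : Nat) (target : Int) : List Int :=
  if h : start < text.length then
    match motif with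
    | [] => []  -- Python raises IndexError here; outside Pre_sseq
    | m :: rest =>
      if m = text[start] then
        if rest = [] then [(start : Int)]
        else
          let indices := fimA text rest (start + 1) (target - 1)
          if (indices.length : Int) = target - 1 then indices ++ [(start : Int)]
          else fimA text (m :: rest) (start + 1) target
      else fimA text (m :: rest) (start + 1) target
  else []
termination_by (motif.length, text.length - start)
decreasing_by all_goals (simp_all [Prod.lex_iff]; try omega)

def sseq (fasta : List (String × String)) : List Int :=
  match PySem.List.pyGet? fasta 0, PySem.List.pyGet? fasta 1 with
  | some (_, text), some (_, motif) =>
    ((PySem.List.slice? (fimA text.toList motif.toList 0 (motif.toList.length : Int))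
        (some (-1)) none (-1)).getD []).map (fun i => i + 1)
  | _, _ => []  -- fasta[0] / fasta[1] raises IndexError; outside Pre_sseq

-- ===== PORT B =====
def sseq_alt (fasta : List (String × String)) : List Int :=
  match PySem.List.pyGet? fasta 0 with
  | none => []  -- fasta[0] raises IndexError; outside Pre_sseq
  | some (_, text) =>
    match PySem.List.pyGet? fasta 1 with
    | none => []  -- fasta[1] raises IndexError; outside Pre_sseq
    | some (_, motif) =>
      let m := motif.toList
      let st := (PySem.List.enumerate text.toList 0).foldl
        (fun (s : List Int × Nat) (p : Int × Char) =>
          if s.2 < m.length ∧ m[s.2]? = some p.2 then (s.1 ++ [p.1 + 1], s.2 + 1) else s)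
        ([], 0)
      if st.2 = m.length then st.1 else []

-- ===== PRECONDITION & SPEC =====
-- Pre_sseq: Python A raises IndexError when fasta has fewer than two records, or when the
-- motif is empty while the text is not (motif[0] on the empty string); exactly those are excluded.
def Pre_sseq (fasta : List (String × String)) : Prop :=
  2 ≤ fasta.length ∧ ((fasta.getD 1 ("", "")).2 ≠ "" ∨ (fasta.getD 0 ("", "")).2 = "")
instance (fasta : List (String × String)) : Decidable (Pre_sseq fasta) := by
  unfold Pre_sseq; infer_instance
def pvWitness_sseq : (List (String × String)) := [("h", "acgtacgt"), ("m", "cta")]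

def Spec_sseq (fasta : List (String × String)) (out : List Int) : Prop := out = sseq_alt fasta
instance (fasta : List (String × String)) (out : List Int) : Decidable (Spec_sseq fasta out) := by unfold Spec_sseq; infer_instance

-- ===== CLAIM (what is proved, stated in full; the proofs are below) =====
def Claim_equal_sseq : Prop := ∀ (fasta : List (String × String)), Dom_sseq fasta → Pre_sseq fasta → Spec_sseq fasta (sseq fasta)

-- ===== LEMMAS AND PROOFS =====

-- Greedy subsequence matcher (proof-side characterisation): positions (index+1) of the
-- greedy match of motif inside cs, where cs starts at absolute index i; none if no match.
def G : List Char → List Char → Int → Option (List Int)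
  | _, [], _ => some []
  | [], _ :: _, _ => none
  | c :: cs, m :: ms, i =>
    if c = m then (G cs ms (i + 1)).map (fun l => (i + 1) :: l)
    else G cs (m :: ms) (i + 1)

theorem G_motif_nil (cs : List Char) (i : Int) : G cs [] i = some [] := by
  cases cs <;> rfl

theorem G_nil_cons (m : Char) (ms : List Char) (i : Int) : G [] (m :: ms) i = none := rfl

theorem G_cons_cons (c : Char) (cs : List Char) (m : Char) (ms : List Char) (i : Int) :
    G (c :: cs) (m :: ms) i =
      if c = m then (G cs ms (i + 1)).map (fun l => (i + 1) :: l)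
      else G cs (m :: ms) (i + 1) := rfl

theorem G_length : ∀ (cs ms : List Char) (i : Int) (l : List Int),
    G cs ms i = some l → l.length = ms.length := by
  intro cs
  induction cs with
  | nil => intro ms i l h; cases ms <;> simp [G] at h; simp [h.symm]
  | cons c cs ih =>
    intro ms i l h
    cases ms with
    | nil => simp [G] at h; simp [h.symm]
    | cons m ms' =>
      by_cases hc : c = m
      · simp [G, hc] at h
        obtain ⟨l', hl', rfl⟩ := h
        simp [ih _ _ _ hl']
      · simp [G, hc] at h
        exact ih _ _ _ h

-- greedy optimality, contrapositive form: if the shorter motif has no match, neither has the longer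
theorem G_mono : ∀ (cs : List Char) (m : Char) (ms : List Char) (i : Int),
    G cs ms i = none → G cs (m :: ms) i = none := by
  intro cs
  induction cs with
  | nil => intro m ms i _; simp [G]
  | cons c cs ih =>
    intro m ms i h
    cases ms with
    | nil => simp [G] at h
    | cons n ns =>
      have hrec : G cs (n :: ns) (i + 1) = none := by
        by_cases hn : c = n
        · simp [G, hn] at h
          exact ih n ns (i + 1) h
        · simpa [G, hn] using h
      by_cases hm : c = m
      · simp [G, hm, hrec]
      · simpa [G, hm] using ih m (n :: ns) (i + 1) hrec

theorem fimA_eq_G : ∀ (text motif : List Char) (start : Nat) (target : Int),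
    target = (motif.length : Int) →
    fimA text motif start target =
      (((G (text.drop start) motif (start : Int)).getD []).map (fun x => x - 1)).reverse := by
  intro text motif start target
  fun_induction fimA text motif start target with
  | case1 start target h =>
    intro _
    rw [List.drop_eq_getElem_cons h, G_motif_nil]
    simp
  | case2 start target h =>
    intro _
    rw [List.drop_eq_getElem_cons h, G_cons_cons]
    simp [G_motif_nil]
  | case3 start target h rest hrest indices hlen ih =>
    intro ht
    have htr : target - 1 = (rest.length : Int) := by
      rw [ht]; push_cast [List.length_cons]; ring
    have hlen' : ((fimA text rest (start + 1) (target - 1)).length : Int) = target - 1 := hlen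
    rw [ih htr] at hlen'
    show fimA text rest (start + 1) (target - 1) ++ [(start : Int)] = _
    rw [ih htr]
    cases hg : G (text.drop (start + 1)) rest ((start + 1 : Nat) : Int) with
    | none =>
      rw [hg] at hlen'
      simp at hlen'
      have h0 : rest.length = 0 := by omega
      exact absurd (List.length_eq_zero_iff.mp h0) hrest
    | some l =>
      push_cast at hg
      rw [List.drop_eq_getElem_cons h]
      rw [G_cons_cons]
      simp [hg]
  | case4 start target h rest hrest indices hlen ih2 ih1 =>
    intro ht
    have htr : target - 1 = (rest.length : Int) := by
      rw [ht]; push_cast [List.length_cons]; ring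
    have hg : G (text.drop (start + 1)) rest ((start + 1 : Nat) : Int) = none := by
      cases hg : G (text.drop (start + 1)) rest ((start + 1 : Nat) : Int) with
      | none => rfl
      | some l =>
        exfalso
        have hlen' : ¬ ((fimA text rest (start + 1) (target - 1)).length : Int) = target - 1 := hlen
        apply hlen'
        rw [ih2 htr, hg, htr]
        simp [G_length _ _ _ _ hg]
    rw [ih1 ht, List.drop_eq_getElem_cons h]
    have hg2 : G (text.drop (start + 1)) (text[start] :: rest) ((start + 1 : Nat) : Int) = none :=
      G_mono _ _ _ _ hg
    push_cast at hg hg2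
    rw [G_cons_cons]
    simp [hg, hg2]
  | case5 start target h m rest hne ih =>
    intro ht
    rw [ih ht, List.drop_eq_getElem_cons h]
    have : ¬ (text[start] = m) := fun hh => hne hh.symm
    rw [G_cons_cons]
    simp [this]
  | case6 motif start target h =>
    intro _
    have hnil : text.drop start = [] := List.drop_eq_nil_of_le (by omega)
    cases motif <;> simp [hnil, G_motif_nil, G_nil_cons]

-- xs[-1::-1] is list reversal
theorem revSlice (xs : List Int) :
    PySem.List.slice? xs (some (-1)) none (-1) = some xs.reverse := by
  have h : PySem.List.sliceIndices xs.length (some (-1)) none (-1) =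
      PySem.List.sliceIndices xs.length none none (-1) := by
    simp [PySem.List.sliceIndices]; omega
  have h2 := PySem.List.slice?_none_none_neg_one (xs := xs)
  simp only [PySem.List.slice?] at h2 ⊢
  rw [h]
  exact h2

-- the step function of B's fold (literally the lambda in sseq_alt)
def fstep (mL : List Char) (s : List Int × Nat) (p : Int × Char) : List Int × Nat :=
  if s.2 < mL.length ∧ mL[s.2]? = some p.2 then (s.1 ++ [p.1 + 1], s.2 + 1) else s

theorem FB1 : ∀ (mL cs : List Char) (j : Nat) (acc : List Int) (i : Int) (l : List Int),
    j ≤ mL.length → G cs (mL.drop j) i = some l →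
    (PySem.List.enumerate cs i).foldl (fstep mL) (acc, j) = (acc ++ l, mL.length) := by
  intro mL cs
  induction cs with
  | nil =>
    intro j acc i l hj hG
    cases hd : mL.drop j with
    | cons m ms => rw [hd] at hG; simp [G] at hG
    | nil =>
      rw [hd] at hG
      simp [G] at hG
      have hlen : mL.length ≤ j := List.drop_eq_nil_iff.mp hd
      simp [PySem.List.enumerate, hG.symm]
      omega
  | cons c cs ih =>
    intro j acc i l hj hG
    rw [PySem.List.enumerate_cons, List.foldl_cons]
    cases hd : mL.drop j with
    | nil =>
      have hjl : j = mL.length := le_antisymm hj (List.drop_eq_nil_iff.mp hd)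
      rw [hd] at hG
      simp [G] at hG
      have hstep : fstep mL (acc, j) (i, c) = (acc, j) := by simp [fstep, hjl]
      rw [hstep]
      have := ih j acc (i + 1) [] hj (by rw [hd]; simp [G])
      simpa [hG.symm] using this
    | cons m ms =>
      have hjlt : j < mL.length := by
        by_contra hh
        rw [List.drop_eq_nil_of_le (by omega)] at hd
        cases hd
      have hmj : mL[j]? = some m := by
        have h0 : (mL.drop j)[0]? = some m := by rw [hd]; rfl
        rw [List.getElem?_drop] at h0
        simpa using h0
      have hdrop1 : mL.drop (j + 1) = ms := by
        have ht : (mL.drop j).tail = mL.drop (j + 1) := List.tail_drop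
        rw [hd] at ht
        simpa using ht.symm
      rw [hd] at hG
      by_cases hc : c = m
      · simp [G, hc] at hG
        obtain ⟨l', hl', rfl⟩ := hG
        have hmje : mL[j] = m := by
          rw [List.getElem?_eq_getElem hjlt] at hmj
          exact Option.some.inj hmj
        have hstep : fstep mL (acc, j) (i, c) = (acc ++ [i + 1], j + 1) := by
          simp [fstep, hjlt, hc, hmje]
        rw [hstep]
        have := ih (j + 1) (acc ++ [i + 1]) (i + 1) l' (by omega) (by rw [hdrop1]; exact hl')
        rw [this]
        simp
      · simp [G, hc] at hG
        have hne : ¬ (m = c) := fun hh => hc hh.symm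
        have hstep : fstep mL (acc, j) (i, c) = (acc, j) := by simp [fstep, hmj, hne]
        rw [hstep]
        exact ih j acc (i + 1) l hj (by rw [hd]; exact hG)

theorem FB2 : ∀ (mL cs : List Char) (j : Nat) (acc : List Int) (i : Int),
    G cs (mL.drop j) i = none →
    ((PySem.List.enumerate cs i).foldl (fstep mL) (acc, j)).2 < mL.length := by
  intro mL cs
  induction cs with
  | nil =>
    intro j acc i hG
    cases hd : mL.drop j with
    | nil => rw [hd] at hG; simp [G] at hG
    | cons m ms =>
      have hjlt : j < mL.length := by
        by_contra hh
        rw [List.drop_eq_nil_of_le (by omega)] at hd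
        cases hd
      simpa [PySem.List.enumerate] using hjlt
  | cons c cs ih =>
    intro j acc i hG
    rw [PySem.List.enumerate_cons, List.foldl_cons]
    cases hd : mL.drop j with
    | nil => rw [hd] at hG; simp [G] at hG
    | cons m ms =>
      have hjlt : j < mL.length := by
        by_contra hh
        rw [List.drop_eq_nil_of_le (by omega)] at hd
        cases hd
      have hmj : mL[j]? = some m := by
        have h0 : (mL.drop j)[0]? = some m := by rw [hd]; rfl
        rw [List.getElem?_drop] at h0
        simpa using h0
      have hdrop1 : mL.drop (j + 1) = ms := by
        have ht : (mL.drop j).tail = mL.drop (j + 1) := List.tail_drop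
        rw [hd] at ht
        simpa using ht.symm
      rw [hd] at hG
      by_cases hc : c = m
      · simp [G, hc] at hG
        have hmje : mL[j] = m := by
          rw [List.getElem?_eq_getElem hjlt] at hmj
          exact Option.some.inj hmj
        have hstep : fstep mL (acc, j) (i, c) = (acc ++ [i + 1], j + 1) := by
          simp [fstep, hjlt, hc, hmje]
        rw [hstep]
        exact ih (j + 1) (acc ++ [i + 1]) (i + 1) (by rw [hdrop1]; exact hG)
      · simp [G, hc] at hG
        have hne : ¬ (m = c) := fun hh => hc hh.symm
        have hstep : fstep mL (acc, j) (i, c) = (acc, j) := by simp [fstep, hmj, hne]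
        rw [hstep]
        exact ih j acc (i + 1) (by rw [hd]; exact hG)

-- ===== VERDICT (by name: the statement is the Claim_ definition above) =====
theorem sseq_spec : Claim_equal_sseq := by
  intro fasta _ hpre
  show sseq fasta = sseq_alt fasta
  obtain ⟨hlen, -⟩ := hpre
  match fasta, hlen with
  | (h0, text) :: (h1, motif) :: rest, _ =>
    have hget0 : PySem.List.pyGet? ((h0, text) :: (h1, motif) :: rest) 0 = some (h0, text) := by
      simp [PySem.List.pyGet?_zero]
    have hget1 : PySem.List.pyGet? ((h0, text) :: (h1, motif) :: rest) 1 = some (h1, motif) := by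
      rw [show (1 : Int) = ((1 : Nat) : Int) from rfl, PySem.List.pyGet?_natCast]
      rfl
    rw [sseq, sseq_alt, hget0, hget1]
    simp only
    rw [revSlice]
    rw [fimA_eq_G text.toList motif.toList 0 _ rfl]
    rw [show (fun (s : List Int × Nat) (p : Int × Char) =>
          if s.2 < motif.toList.length ∧ motif.toList[s.2]? = some p.2
          then (s.1 ++ [p.1 + 1], s.2 + 1) else s) = fstep motif.toList from rfl]
    cases hg : G text.toList motif.toList 0 with
    | some l =>
      have hA : G (text.toList.drop 0) motif.toList ((0 : Nat) : Int) = some l := by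
        simpa using hg
      have hB := FB1 motif.toList text.toList 0 [] 0 l (by omega) (by simpa using hg)
      rw [hA, hB]
      simp [List.map_map, Function.comp_def]
    | none =>
      have hA : G (text.toList.drop 0) motif.toList ((0 : Nat) : Int) = none := by
        simpa using hg
      have hB := FB2 motif.toList text.toList 0 [] 0 (by simpa using hg)
      rw [hA]
      have hlt : motif.toList.length = motif.length := by simp
      rw [hlt] at hB
      have hne : ((PySem.List.enumerate text.toList 0).foldl (fstep motif.toList) ([], 0)).2 ≠
          motif.length := by omega
      simp [hne]
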